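-- pv_equiv track=rewrite | github.com/Juganof/eatthismuchah | ah_mealplanner/cli.py | default_meal_tags
-- ===== SOURCE A (Python) =====
-- from typing import List
--
-- def default_meal_tags(meals: int) -> List[List[str]]:
--     meals = int(meals)
--     slots: List[List[str]] = []
--     if meals >= 1:
--         slots.append(["ontbijt", "breakfast"])
--     if meals >= 2:
--         slots.append(["lunch", "brood", "salade"])
--     if meals >= 3:
--         slots.append(["diner", "avondeten", "hoofdgerecht", "maaltijd"])
--     for _ in range(3, meals):
--         slots.append([])  # no bias for extra meals/snacks
--     return slots
-- ===== SOURCE B (Python) =====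
-- from typing import List
--
-- DEFAULTS: List[List[str]] = [
--     ["ontbijt", "breakfast"],
--     ["lunch", "brood", "salade"],
--     ["diner", "avondeten", "hoofdgerecht", "maaltijd"],
-- ]
--
-- def default_meal_tags(meals: int) -> List[List[str]]:
--     m = int(meals)
--     defaults = DEFAULTS
--     out: List[List[str]] = []
--     while m > 0:
--         out.append(list(defaults[0]) if defaults else [])
--         defaults = defaults[1:]
--         m -= 1
--     return out
-- ===== Notes on version B (the rewrite author's own statement) =====
-- stated objective: alternative
-- what changed: Replaces A's three guarded appends plus trailing filler loop by one uniform count-down loop that peels the head off a constant DEFAULTS table each iteration (empty slot once the table is exhausted).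
import Mathlib
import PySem

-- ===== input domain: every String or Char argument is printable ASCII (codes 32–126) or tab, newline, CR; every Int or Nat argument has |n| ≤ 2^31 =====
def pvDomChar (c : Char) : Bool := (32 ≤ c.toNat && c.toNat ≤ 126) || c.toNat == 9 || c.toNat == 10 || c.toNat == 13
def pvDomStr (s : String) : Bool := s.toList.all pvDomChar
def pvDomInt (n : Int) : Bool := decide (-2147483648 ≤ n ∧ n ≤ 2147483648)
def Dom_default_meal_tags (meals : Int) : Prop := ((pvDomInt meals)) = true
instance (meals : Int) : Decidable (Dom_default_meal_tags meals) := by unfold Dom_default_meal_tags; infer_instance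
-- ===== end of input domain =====

-- B replaces A's three guarded appends plus trailing filler loop by one uniform
-- count-down loop peeling the head off a constant DEFAULTS table (objective: alternative).

-- ===== PORT A =====
def default_meal_tags (meals : Int) : List (List String) :=
  let slots : List (List String) := []
  let slots := if meals ≥ 1 then slots ++ [["ontbijt", "breakfast"]] else slots
  let slots := if meals ≥ 2 then slots ++ [["lunch", "brood", "salade"]] else slots
  let slots := if meals ≥ 3 then slots ++ [["diner", "avondeten", "hoofdgerecht", "maaltijd"]] else slots
  (PySem.List.pyRange 3 meals 1).foldl (fun s _ => s ++ [([] : List String)]) slots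

-- ===== PORT B =====
def pvDEFAULTS : List (List String) :=
  [["ontbijt", "breakfast"],
   ["lunch", "brood", "salade"],
   ["diner", "avondeten", "hoofdgerecht", "maaltijd"]]

def pvGo (m : Int) (defaults out : List (List String)) : List (List String) :=
  if m ≤ 0 then out
  else pvGo (m - 1) defaults.tail (out ++ [defaults.headD []])
termination_by m.toNat
decreasing_by omega

def default_meal_tags_alt (meals : Int) : List (List String) :=
  pvGo meals pvDEFAULTS []

-- ===== PRECONDITION & SPEC =====
def Spec_default_meal_tags (meals : Int) (out : List (List String)) : Prop := out = default_meal_tags_alt meals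
instance (meals : Int) (out : List (List String)) : Decidable (Spec_default_meal_tags meals out) := by unfold Spec_default_meal_tags; infer_instance

-- ===== CLAIM (what is proved, stated in full; the proofs are below) =====
def Claim_equal_default_meal_tags : Prop := ∀ (meals : Int), Dom_default_meal_tags meals → Spec_default_meal_tags meals (default_meal_tags meals)

-- ===== LEMMAS AND PROOFS =====

theorem pvGo_pos (m : Int) (h : 0 < m) (ds out : List (List String)) :
    pvGo m ds out = pvGo (m - 1) ds.tail (out ++ [ds.headD []]) := by
  rw [pvGo]; simp [show ¬ m ≤ 0 from by omega]

theorem pvGo_nonpos (m : Int) (h : m ≤ 0) (ds out : List (List String)) :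
    pvGo m ds out = out := by
  rw [pvGo]; simp [h]

theorem pvGo_nil (n : Nat) (m : Int) (hn : m.toNat = n) (out : List (List String)) :
    pvGo m [] out = out ++ List.replicate n ([] : List String) := by
  induction n generalizing m out with
  | zero => rw [pvGo_nonpos m (by omega)]; simp
  | succ k ih =>
      rw [pvGo_pos m (by omega)]
      simp [ih (m - 1) (by omega), List.replicate_succ]

theorem foldl_append_const {α β : Type} (l : List α) (x : β) (init : List β) :
    l.foldl (fun s _ => s ++ [x]) init = init ++ l.map (fun _ => x) := by
  induction l generalizing init with
  | nil => simp
  | cons a t ih => simp [List.foldl, ih]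

-- ===== VERDICT (by name: the statement is the Claim_ definition above) =====
theorem default_meal_tags_spec : Claim_equal_default_meal_tags := by
  intro meals _
  show default_meal_tags meals = default_meal_tags_alt meals
  rcases (by omega : meals < 3 ∨ 3 ≤ meals) with h3 | h3
  · rcases (by omega : meals ≤ 0 ∨ meals = 1 ∨ meals = 2) with h | h | h
    · simp [default_meal_tags, default_meal_tags_alt,
        PySem.List.pyRange_one_eq_nil (by omega : meals ≤ 3),
        show ¬(1 ≤ meals) from by omega, show ¬(2 ≤ meals) from by omega,
        show ¬(3 ≤ meals) from by omega, pvGo_nonpos meals h]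
    · subst h
      unfold default_meal_tags_alt pvDEFAULTS
      rw [pvGo_pos 1 (by norm_num)]
      norm_num [pvGo_nonpos 0 (by norm_num), default_meal_tags,
        PySem.List.pyRange_one_eq_nil (by norm_num : (1:Int) ≤ 3)]
    · subst h
      unfold default_meal_tags_alt pvDEFAULTS
      rw [pvGo_pos 2 (by norm_num)]
      norm_num [pvGo_pos 1 (by norm_num), pvGo_nonpos 0 (by norm_num), default_meal_tags,
        PySem.List.pyRange_one_eq_nil (by norm_num : (2:Int) ≤ 3)]
  · have hB : default_meal_tags_alt meals
        = ["ontbijt", "breakfast"] :: ["lunch", "brood", "salade"]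
          :: ["diner", "avondeten", "hoofdgerecht", "maaltijd"]
          :: List.replicate (meals - 3).toNat [] := by
      unfold default_meal_tags_alt pvDEFAULTS
      rw [pvGo_pos meals (by omega), pvGo_pos (meals - 1) (by omega),
        pvGo_pos (meals - 1 - 1) (by omega)]
      simp [pvGo_nil (meals - 3).toNat (meals - 1 - 1 - 1) (by omega)]
    rw [hB]
    simp only [default_meal_tags,
      if_pos (by omega : meals ≥ 1), if_pos (by omega : meals ≥ 2),
      if_pos (by omega : meals ≥ 3), foldl_append_const]
    simp [List.map_const', PySem.List.length_pyRange_one]
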